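-- pv_equiv track=rewrite | github.com/JesseLau24/Self_Learning | School/Python_Val/StringPractice-Guess_Letters.py | convert_asterisks
-- ===== SOURCE A (Python) =====
-- def convert_asterisks(s:str) -> str:
--     asterisks = ''
--
--     for char in s:
--         if char != ' ':
--             asterisks += '*'
--         else:
--             asterisks += char
--
--     return asterisks
-- ===== SOURCE B (Python) =====
-- def convert_asterisks(s: str) -> str:
--     # Mask each space-delimited segment at once by its length instead of
--     # branching per character.
--     return ' '.join('*' * len(part) for part in s.split(' '))
-- ===== Notes on version B (the rewrite author's own statement) =====
-- stated objective: faster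
-- what changed: Replaces the per-character branch-and-concatenate loop with a split on the space character, mapping each segment to an asterisk run of its length and joining the runs back with single spaces.
import Mathlib
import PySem

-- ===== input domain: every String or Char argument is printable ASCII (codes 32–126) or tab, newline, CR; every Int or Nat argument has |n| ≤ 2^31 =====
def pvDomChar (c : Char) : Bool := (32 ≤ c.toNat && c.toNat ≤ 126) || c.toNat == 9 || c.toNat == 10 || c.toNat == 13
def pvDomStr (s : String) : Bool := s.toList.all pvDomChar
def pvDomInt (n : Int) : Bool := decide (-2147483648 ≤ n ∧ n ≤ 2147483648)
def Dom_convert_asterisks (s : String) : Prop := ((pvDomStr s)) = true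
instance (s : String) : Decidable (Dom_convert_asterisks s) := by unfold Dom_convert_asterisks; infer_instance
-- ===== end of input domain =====

-- B rewrites A's per-character branch-and-append loop as split-on-space / mask each segment by its length / join (idiomatic; same result).

-- ===== PORT A =====
-- per-character loop: append '*' for non-space, the char itself for space
def convert_asterisks (s : String) : String :=
  String.mk (s.toList.foldl (fun acc c => if c ≠ ' ' then acc ++ ['*'] else acc ++ [c]) [])

-- ===== PORT B =====
-- ' '.join('*' * len(part) for part in s.split(' '))
def convert_asterisks_alt (s : String) : String :=
  String.mk (PySem.Chars.join [' ']
    ((PySem.Chars.splitOn s.toList [' ']).map (fun p => List.replicate p.length '*')))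

-- ===== PRECONDITION & SPEC =====
def Spec_convert_asterisks (s : String) (out : String) : Prop := out = convert_asterisks_alt s
instance (s : String) (out : String) : Decidable (Spec_convert_asterisks s out) := by unfold Spec_convert_asterisks; infer_instance

-- ===== CLAIM (what is proved, stated in full; the proofs are below) =====
def Claim_equal_convert_asterisks : Prop := ∀ (s : String), Dom_convert_asterisks s → Spec_convert_asterisks s (convert_asterisks s)

-- ===== LEMMAS AND PROOFS =====

-- simple recursive model of splitting on a single space
def pvSplitSp (pre : List Char) : List Char → List (List Char)
  | [] => [pre]
  | c :: rest => if c = ' ' then pre :: pvSplitSp [] rest else pvSplitSp (pre ++ [c]) rest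

theorem pvSplitSp_ne_nil (pre : List Char) (l : List Char) : pvSplitSp pre l ≠ [] := by
  induction l generalizing pre with
  | nil => simp [pvSplitSp]
  | cons c rest ih => simp only [pvSplitSp]; split_ifs <;> simp [ih]

theorem pv_go_eq (l : List Char) : ∀ (fuel : Nat) (cur : List Char) (hacc : List (List Char)),
    l.length < fuel →
    PySem.Chars.splitOn.go [' '] fuel l cur hacc = hacc.reverse ++ pvSplitSp cur.reverse l := by
  induction l with
  | nil =>
    intro fuel cur hacc h
    match fuel, h with
    | fuel + 1, _ => simp [PySem.Chars.splitOn.go, pvSplitSp]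
  | cons c rest ih =>
    intro fuel cur hacc h
    match fuel, h with
    | fuel + 1, h =>
      have hf : rest.length < fuel := by simpa using Nat.lt_of_succ_lt_succ h
      by_cases hc : c = ' '
      · subst hc
        rw [show PySem.Chars.splitOn.go [' '] (fuel + 1) (' ' :: rest) cur hacc
              = PySem.Chars.splitOn.go [' '] fuel rest [] (cur.reverse :: hacc) by
            simp [PySem.Chars.splitOn.go, List.isPrefixOf]]
        rw [ih fuel [] (cur.reverse :: hacc) hf]
        simp [pvSplitSp]
      · rw [show PySem.Chars.splitOn.go [' '] (fuel + 1) (c :: rest) cur hacc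
              = PySem.Chars.splitOn.go [' '] fuel rest (c :: cur) hacc by
            simp [PySem.Chars.splitOn.go, List.isPrefixOf, Ne.symm hc]]
        rw [ih fuel (c :: cur) hacc hf]
        simp [pvSplitSp, hc]

theorem pv_splitOn_eq (l : List Char) : PySem.Chars.splitOn l [' '] = pvSplitSp [] l := by
  rw [PySem.Chars.splitOn, pv_go_eq l (l.length + 1) [] [] (Nat.lt_succ_self _)]
  simp

theorem pv_join_splitSp (l pre : List Char) :
    PySem.Chars.join [' '] ((pvSplitSp pre l).map (fun p => List.replicate p.length '*'))
      = List.replicate pre.length '*' ++ l.map (fun c => if c ≠ ' ' then '*' else c) := by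
  induction l generalizing pre with
  | nil => simp [pvSplitSp, PySem.Chars.join, List.intercalate]
  | cons c rest ih =>
    by_cases hc : c = ' '
    · subst hc
      obtain ⟨h, t, ht⟩ : ∃ h t, pvSplitSp ([] : List Char) rest = h :: t := by
        cases hsp : pvSplitSp ([] : List Char) rest with
        | nil => exact absurd hsp (pvSplitSp_ne_nil _ _)
        | cons h t => exact ⟨h, t, rfl⟩
      have e : pvSplitSp pre (' ' :: rest) = pre :: h :: t := by
        rw [pvSplitSp, if_pos rfl, ht]
      have := ih ([] : List Char)
      rw [ht] at this
      simp only [List.map_cons] at this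
      rw [e]
      simp only [List.map_cons]
      rw [PySem.Chars.join_cons_cons, this]
      simp
    · simp only [pvSplitSp, if_neg hc]
      rw [ih (pre ++ [c])]
      simp [hc, List.replicate_succ']

theorem pv_foldl_eq (l acc : List Char) :
    l.foldl (fun acc c => if c ≠ ' ' then acc ++ ['*'] else acc ++ [c]) acc
      = acc ++ l.map (fun c => if c ≠ ' ' then '*' else c) := by
  induction l generalizing acc with
  | nil => simp
  | cons c rest ih =>
    simp only [List.foldl_cons, List.map_cons]
    rw [ih]
    split_ifs <;> simp

-- ===== VERDICT (by name: the statement is the Claim_ definition above) =====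
theorem convert_asterisks_spec : Claim_equal_convert_asterisks := by
  intro s _
  unfold Spec_convert_asterisks convert_asterisks convert_asterisks_alt
  rw [pv_splitOn_eq, pv_join_splitSp, pv_foldl_eq]
  simp
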